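-- pv_equiv track=rewrite | github.com/ldruizsan/perses | perses/rjmc/geometry.py | _calculate_growth_idx
-- ===== SOURCE A (Python) =====
-- def _calculate_growth_idx(particle_indices, growth_indices):
--     """
--     Utility function to calculate the growth index of a particular force.
--     For each particle index, it will check to see if it is in growth_indices.
--     If not, 0 is added to an array, if yes, the index in growth_indices is added.
--     Finally, the method returns the max of the accumulated array
--     Parameters
--     ----------
--     particle_indices : list of int
--         The indices of particles involved in this force
--     growth_indices : list of int
--         The ordered list of indices for atom position proposals
--     Returns
--     -------
--     growth_idx : int
--         The growth_idx parameter
--     """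
--     particle_indices_set = set(particle_indices)
--     growth_indices_set = set(growth_indices)
--     new_atoms_in_force = particle_indices_set.intersection(growth_indices_set)
--     if len(new_atoms_in_force) == 0:
--         return 0
--     new_atom_growth_order = [growth_indices.index(atom_idx)+1 for atom_idx in new_atoms_in_force]
--     return max(new_atom_growth_order)
-- ===== SOURCE B (Python) =====
-- def _calculate_growth_idx(particle_indices, growth_indices):
--     """One pass over growth_indices: whenever an element occurs for the first
--     time and belongs to the particle set, record its 1-based position; the last
--     such record is the maximum.  O(n + k) instead of A's O(k * n)."""
--     particle_set = set(particle_indices)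
--     seen = set()
--     best = 0
--     for i, atom in enumerate(growth_indices):
--         if atom not in seen:
--             seen.add(atom)
--             if atom in particle_set:
--                 best = i + 1
--     return best
-- ===== Notes on version B (the rewrite author's own statement) =====
-- stated objective: faster
-- what changed: Replaces A's set-intersection plus a growth_indices.index scan per common atom (and a final max) by a single enumerate pass over growth_indices with a seen-set that records the 1-based position of each first occurrence lying in the particle set; the last record is the maximum, so the inner index scans disappear.
import Mathlib
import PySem

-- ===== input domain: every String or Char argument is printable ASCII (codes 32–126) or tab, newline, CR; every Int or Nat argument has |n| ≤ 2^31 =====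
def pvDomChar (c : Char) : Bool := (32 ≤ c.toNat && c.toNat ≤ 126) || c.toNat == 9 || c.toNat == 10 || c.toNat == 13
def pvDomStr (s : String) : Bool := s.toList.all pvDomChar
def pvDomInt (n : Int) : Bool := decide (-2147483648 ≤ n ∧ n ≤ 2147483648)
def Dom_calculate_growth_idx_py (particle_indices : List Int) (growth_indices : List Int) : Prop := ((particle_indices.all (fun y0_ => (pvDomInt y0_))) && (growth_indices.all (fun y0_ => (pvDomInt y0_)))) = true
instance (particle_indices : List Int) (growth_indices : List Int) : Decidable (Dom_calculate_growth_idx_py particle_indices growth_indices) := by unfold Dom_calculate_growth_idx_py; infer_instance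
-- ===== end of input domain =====

-- B replaces A's per-atom list.index scans (O(k*n)) by one pass over growth_indices
-- with a seen-set, recording the 1-based position of each first occurrence in the
-- particle set; the last record is the max ("faster" in a timing run).

-- ===== PORT A =====
-- max over the intersection of the nonempty list (order-independent, so the Set's
-- iteration order does not matter); .getD defaults are unreachable (atom ∈ growth_indices,
-- and the list is nonempty in the else-branch).
def calculate_growth_idx_py (particle_indices : List Int) (growth_indices : List Int) : Int :=
  let particle_indices_set := PySem.Set.ofList particle_indices
  let growth_indices_set := PySem.Set.ofList growth_indices
  let new_atoms_in_force := PySem.Set.inter particle_indices_set growth_indices_set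
  if PySem.Set.len new_atoms_in_force = 0 then 0
  else
    let new_atom_growth_order :=
      new_atoms_in_force.map
        (fun atom_idx => (((PySem.List.index? growth_indices atom_idx).getD 0 : Nat) : Int) + 1)
    (PySem.List.max? new_atom_growth_order (fun x => x)).getD 0

-- ===== PORT B =====
-- the loop body of Source B (state = (seen, best))
def pvStepB (pset : PySem.Set Int) (st : PySem.Set Int × Int) (ix : Int × Int) :
    PySem.Set Int × Int :=
  if PySem.Set.contains st.1 ix.2 then st
  else
    let seen := PySem.Set.add st.1 ix.2
    if PySem.Set.contains pset ix.2 then (seen, ix.1 + 1) else (seen, st.2)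

def calculate_growth_idx_py_alt (particle_indices : List Int) (growth_indices : List Int) : Int :=
  let particle_set := PySem.Set.ofList particle_indices
  ((PySem.List.enumerate growth_indices 0).foldl (pvStepB particle_set)
    (PySem.Set.empty, 0)).2

-- ===== PRECONDITION & SPEC =====
def Spec_calculate_growth_idx_py (particle_indices : List Int) (growth_indices : List Int) (out : Int) : Prop := out = calculate_growth_idx_py_alt particle_indices growth_indices
instance (particle_indices : List Int) (growth_indices : List Int) (out : Int) : Decidable (Spec_calculate_growth_idx_py particle_indices growth_indices out) := by unfold Spec_calculate_growth_idx_py; infer_instance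

-- ===== CLAIM (what is proved, stated in full; the proofs are below) =====
def Claim_equal_calculate_growth_idx_py : Prop := ∀ (particle_indices : List Int) (growth_indices : List Int), Dom_calculate_growth_idx_py particle_indices growth_indices → Spec_calculate_growth_idx_py particle_indices growth_indices (calculate_growth_idx_py particle_indices growth_indices)

-- ===== LEMMAS AND PROOFS =====

-- idxOf? on a member computes the first index (used to discharge A's `.getD 0`)
lemma pv_idxOf?_of_mem (a : Int) (l : List Int) (h : a ∈ l) :
    List.idxOf? a l = some (List.idxOf a l) := by
  induction l with
  | nil => simp at h
  | cons x t ih =>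
    by_cases hx : x = a
    · subst hx; simp [List.idxOf?_cons, List.idxOf_cons_self]
    · have ht : a ∈ t := by
        rcases List.mem_cons.mp h with h' | h'
        · exact absurd h'.symm hx
        · exact h'
      have hb : (x == a) = false := by simp [hx]
      simp [List.idxOf?_cons, hb, List.idxOf_cons_ne _ hx, ih ht]

-- loop invariant of B: the final `best` is an upper bound of the 1-based first
-- positions of all unseen particle atoms, and is either the initial `best` or one
-- of those positions.
lemma pv_loopB (pset : PySem.Set Int) (g : List Int) : ∀ (s : Int) (seen : PySem.Set Int) (b : Int),
    (∀ a, a ∈ g → a ∉ seen → PySem.Set.contains pset a = true →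
      s + (List.idxOf a g : Int) + 1 ≤ ((PySem.List.enumerate g s).foldl (pvStepB pset) (seen, b)).2)
    ∧ (((PySem.List.enumerate g s).foldl (pvStepB pset) (seen, b)).2 = b
       ∨ ∃ a, a ∈ g ∧ a ∉ seen ∧ PySem.Set.contains pset a = true ∧
          ((PySem.List.enumerate g s).foldl (pvStepB pset) (seen, b)).2
            = s + (List.idxOf a g : Int) + 1) := by
  induction g with
  | nil =>
    intro s seen b
    constructor
    · intro a ha; simp at ha
    · left; simp [PySem.List.enumerate]
  | cons x t ih =>
    intro s seen b
    rw [PySem.List.enumerate_cons]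
    simp only [List.foldl_cons, pvStepB]
    by_cases hseen : x ∈ seen
    · have hc : PySem.Set.contains seen x = true := (PySem.Set.contains_iff seen x).mpr hseen
      simp only [hc, if_true]
      obtain ⟨ih1, ih2⟩ := ih (s + 1) seen b
      constructor
      · intro a ha hns hp
        have hax : a ≠ x := fun h => hns (h ▸ hseen)
        have hat : a ∈ t := by
          rcases List.mem_cons.mp ha with h' | h'
          · exact absurd h' hax
          · exact h'
        have := ih1 a hat hns hp
        rw [List.idxOf_cons_ne _ (Ne.symm hax)]
        push_cast
        omega
      · rcases ih2 with h2 | ⟨a, hat, hns, hp, hval⟩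
        · left; exact h2
        · right
          have hax : a ≠ x := fun h => hns (h ▸ hseen)
          refine ⟨a, List.mem_cons_of_mem _ hat, hns, hp, ?_⟩
          rw [List.idxOf_cons_ne _ (Ne.symm hax), hval]
          push_cast
          omega
    · have hc : PySem.Set.contains seen x = false := by
        by_contra h
        exact hseen ((PySem.Set.contains_iff seen x).mp (by simpa using h))
      simp only [hc, Bool.false_eq_true, if_false]
      by_cases hpx : PySem.Set.contains pset x = true
      · simp only [hpx, if_true]
        obtain ⟨ih1, ih2⟩ := ih (s + 1) (PySem.Set.add seen x) (s + 1)
        constructor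
        · intro a ha hns hp
          by_cases hax : a = x
          · subst hax
            rw [List.idxOf_cons_self]
            rcases ih2 with h2 | ⟨a', _, _, _, hval⟩
            · rw [h2]; omega
            · rw [hval]; push_cast; omega
          · have hat : a ∈ t := by
              rcases List.mem_cons.mp ha with h' | h'
              · exact absurd h' hax
              · exact h'
            have hns' : a ∉ PySem.Set.add seen x := by
              rw [PySem.Set.mem_add]
              rintro (h | h)
              · exact hns h
              · exact hax h
            have := ih1 a hat hns' hp
            rw [List.idxOf_cons_ne _ (Ne.symm hax)]
            push_cast
            omega
        · right
          rcases ih2 with h2 | ⟨a, hat, hns, hp, hval⟩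
          · refine ⟨x, List.mem_cons_self, hseen, hpx, ?_⟩
            rw [List.idxOf_cons_self, h2]
            omega
          · have hax : a ≠ x := fun h => hns ((PySem.Set.mem_add seen x a).mpr (Or.inr h))
            refine ⟨a, List.mem_cons_of_mem _ hat, ?_, hp, ?_⟩
            · exact fun h => hns ((PySem.Set.mem_add seen x a).mpr (Or.inl h))
            · rw [List.idxOf_cons_ne _ (Ne.symm hax), hval]
              push_cast
              omega
      · have hpx' : PySem.Set.contains pset x = false := by simpa using hpx
        simp only [hpx', Bool.false_eq_true, if_false]
        obtain ⟨ih1, ih2⟩ := ih (s + 1) (PySem.Set.add seen x) b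
        constructor
        · intro a ha hns hp
          have hax : a ≠ x := by
            intro h
            exact hpx (h ▸ hp)
          have hat : a ∈ t := by
            rcases List.mem_cons.mp ha with h' | h'
            · exact absurd h' hax
            · exact h'
          have hns' : a ∉ PySem.Set.add seen x := by
            rw [PySem.Set.mem_add]
            rintro (h | h)
            · exact hns h
            · exact hax h
          have := ih1 a hat hns' hp
          rw [List.idxOf_cons_ne _ (Ne.symm hax)]
          push_cast
          omega
        · rcases ih2 with h2 | ⟨a, hat, hns, hp, hval⟩
          · left; exact h2
          · right
            have hax : a ≠ x := by
              intro h
              exact hpx (h ▸ hp)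
            refine ⟨a, List.mem_cons_of_mem _ hat, ?_, hp, ?_⟩
            · exact fun h => hns ((PySem.Set.mem_add seen x a).mpr (Or.inl h))
            · rw [List.idxOf_cons_ne _ (Ne.symm hax), hval]
              push_cast
              omega

-- ===== VERDICT (by name: the statement is the Claim_ definition above) =====
theorem calculate_growth_idx_py_spec : Claim_equal_calculate_growth_idx_py := by
  intro p g _
  unfold Spec_calculate_growth_idx_py
  -- facts about B
  have hB := pv_loopB (PySem.Set.ofList p) g 0 PySem.Set.empty 0
  set B := ((PySem.List.enumerate g 0).foldl (pvStepB (PySem.Set.ofList p))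
    (PySem.Set.empty, 0)).2 with hBdef
  have hBalt : calculate_growth_idx_py_alt p g = B := rfl
  have hnotin : ∀ a : Int, a ∉ (PySem.Set.empty : PySem.Set Int) := by
    intro a h
    simp [PySem.Set.empty] at h
  have hcontp : ∀ a : Int, PySem.Set.contains (PySem.Set.ofList p) a = true ↔ a ∈ p := by
    intro a
    rw [PySem.Set.contains_iff, PySem.Set.mem_ofList]
  have hL1 : ∀ a, a ∈ g → a ∈ p → (List.idxOf a g : Int) + 1 ≤ B := by
    intro a hg hp
    have := hB.1 a hg (hnotin a) ((hcontp a).mpr hp)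
    omega
  have hL2 : B = 0 ∨ ∃ a, a ∈ g ∧ a ∈ p ∧ B = (List.idxOf a g : Int) + 1 := by
    rcases hB.2 with h | ⟨a, hg, _, hp, hval⟩
    · left; exact h
    · right; exact ⟨a, hg, (hcontp a).mp hp, by omega⟩
  -- facts about A's intersection
  have hmemI : ∀ a : Int,
      a ∈ PySem.Set.inter (PySem.Set.ofList p) (PySem.Set.ofList g) ↔ a ∈ p ∧ a ∈ g := by
    intro a
    simp [PySem.Set.inter, List.mem_filter, PySem.Set.mem_ofList]
  rw [hBalt]
  unfold calculate_growth_idx_py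
  simp only []
  split_ifs with hlen
  · -- empty intersection: no common atom, so B's loop never updates best
    have hnil : PySem.Set.inter (PySem.Set.ofList p) (PySem.Set.ofList g) = [] := by
      have := hlen
      simp [PySem.Set.len] at this
      exact this
    rcases hL2 with h | ⟨a, hg, hp, _⟩
    · omega
    · exact absurd ((hmemI a).mpr ⟨hp, hg⟩) (by simp [hnil])
  · -- nonempty intersection
    have hne : PySem.Set.inter (PySem.Set.ofList p) (PySem.Set.ofList g) ≠ [] := by
      intro h
      exact hlen (by simp [PySem.Set.len, h])
    set I := PySem.Set.inter (PySem.Set.ofList p) (PySem.Set.ofList g) with hI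
    set f : Int → Int :=
      fun atom_idx => (((PySem.List.index? g atom_idx).getD 0 : Nat) : Int) + 1 with hf
    have hfval : ∀ a, a ∈ g → f a = (List.idxOf a g : Int) + 1 := by
      intro a ha
      rw [hf]
      simp only [PySem.List.index?_eq_idxOf?, pv_idxOf?_of_mem a g ha, Option.getD_some]
    have hmapne : I.map f ≠ [] := by
      simp [hne]
    obtain ⟨m, hm⟩ : ∃ m, PySem.List.max? (I.map f) (fun x => x) = some m := by
      cases hmax : PySem.List.max? (I.map f) (fun x => x) with
      | none => exact absurd ((PySem.List.max?_eq_none_iff _ _).mp hmax) hmapne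
      | some m => exact ⟨m, rfl⟩
    rw [hm, Option.getD_some]
    -- m ≤ B
    obtain ⟨a, haI, hfa⟩ := List.mem_map.mp (PySem.List.max?_mem hm)
    obtain ⟨hap, hag⟩ := (hmemI a).mp haI
    have hmB : m ≤ B := by
      rw [← hfa, hfval a hag]
      exact hL1 a hag hap
    -- B ≤ m
    have hBm : B ≤ m := by
      rcases hL2 with h | ⟨a', hg', hp', hval'⟩
      · have := hL1 a hag hap
        omega
      · have hmemf : f a' ∈ I.map f := List.mem_map_of_mem ((hmemI a').mpr ⟨hp', hg'⟩)
        have := PySem.List.max?_isMax hm (f a') hmemf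
        rw [hfval a' hg'] at this
        omega
    omega
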